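-- pv_equiv track=rewrite | github.com/zakir0101/pdf-element-extraction | engine/pdf_font.py | tokenize_cmap
-- ===== SOURCE A (Python) =====
-- def tokenize_cmap(data):
--     tokens = []
--     current = []
--     in_comment = False
--     for char in data:
--         if char == "%":
--             in_comment = True
--         if in_comment:
--             if char == "\n":
--                 in_comment = False
--             continue
--         if char.isspace():
--             if current:
--                 tokens.append("".join(current))
--                 current = []
--         elif char in "<>":
--             if current:
--                 tokens.append("".join(current))
--                 current = []
--             tokens.append(char)
--         else:
--             current.append(char)
--     if current:
--         tokens.append("".join(current))
--     return tokens
-- ===== SOURCE B (Python) =====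
-- import re
--
-- def tokenize_cmap(data):
--     # Two-phase regex tokenizer: strip comments, then emit tokens in one findall.
--     cleaned = re.sub(r"%[^\n]*\n?", "", data)
--     return re.findall(r"[<>]|[^\s<>]+", cleaned)
-- ===== Notes on version B (the rewrite author's own statement) =====
-- stated objective: idiomatic
-- what changed: Replaced the single-pass char-by-char state machine (in_comment flag, manual current-token buffer) with a two-phase regex pipeline: one re.sub deletes comments, one re.findall emits brackets and maximal non-space runs as tokens.
import Mathlib
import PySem

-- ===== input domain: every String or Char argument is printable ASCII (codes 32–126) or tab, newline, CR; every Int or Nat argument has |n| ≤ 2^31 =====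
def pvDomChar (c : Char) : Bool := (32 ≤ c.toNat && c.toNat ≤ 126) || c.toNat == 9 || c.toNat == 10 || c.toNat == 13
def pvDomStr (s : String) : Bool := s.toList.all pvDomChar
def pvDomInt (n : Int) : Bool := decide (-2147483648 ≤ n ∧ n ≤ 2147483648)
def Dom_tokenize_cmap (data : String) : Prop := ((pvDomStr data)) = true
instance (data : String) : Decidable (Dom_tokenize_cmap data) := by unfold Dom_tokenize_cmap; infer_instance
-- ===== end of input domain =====

-- B replaces A's char-by-char state machine with a two-phase tokenizer (strip comments, then
-- scan maximal token runs — the regex-findall approach); objective: idiomatic. Return values proved equal.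


-- Python's char.isspace / regex \s on the ASCII domain (both Pythons test the same set)
def pySpace (c : Char) : Bool := c = ' ' || c = '\t' || c = '\n' || c = '\r' || c.toNat == 11 || c.toNat == 12

-- ===== PORT A =====
-- A's for-loop over the characters carrying (tokens, current, in_comment), as structural recursion.
def tokACore (tokens : List String) (current : List Char) (inc : Bool) : List Char → List String
  | [] => tokens ++ (if current = [] then [] else [String.ofList current])
  | c :: rest =>
    let inc' := if c = '%' then true else inc
    if inc' then
      tokACore tokens current (decide (c ≠ '\n')) rest
    else if pySpace c then
      (if current = [] then tokACore tokens [] false rest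
       else tokACore (tokens ++ [String.ofList current]) [] false rest)
    else if c = '<' ∨ c = '>' then
      (if current = [] then tokACore (tokens ++ [String.ofList [c]]) [] false rest
       else tokACore (tokens ++ [String.ofList current] ++ [String.ofList [c]]) [] false rest)
    else
      tokACore tokens (current ++ [c]) inc' rest

def tokenize_cmap (data : String) : List String :=
  tokACore [] [] false data.toList

-- ===== PORT B =====
-- Phase 1: re.sub(r"%[^\n]*\n?", "", data) — delete each '%' through its newline (inclusive) or end.
def dropComment : List Char → List Char
  | [] => []
  | c :: rest => if c = '\n' then rest else dropComment rest

theorem dropComment_length_le (l : List Char) : (dropComment l).length ≤ l.length := by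
  induction l with
  | nil => simp [dropComment]
  | cons c rest ih => simp only [dropComment]; split <;> simp; omega

def stripComments : List Char → List Char
  | [] => []
  | c :: rest =>
    if c = '%' then stripComments (dropComment rest) else c :: stripComments rest
termination_by l => l.length
decreasing_by
  · have := dropComment_length_le rest; simp; omega
  · simp

-- Phase 2: re.findall(r"[<>]|[^\s<>]+", cleaned) — brackets alone, else maximal ordinary runs.
def ordinary (c : Char) : Bool := !(pySpace c) && c ≠ '<' && c ≠ '>'

def findTokens : List Char → List String
  | [] => []
  | c :: rest =>
    if pySpace c then findTokens rest
    else if c = '<' ∨ c = '>' then String.ofList [c] :: findTokens rest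
    else String.ofList (c :: rest.takeWhile ordinary) :: findTokens (rest.dropWhile ordinary)
termination_by l => l.length
decreasing_by
  · simp
  · simp
  · have := List.length_dropWhile_le (p := ordinary) (l := rest); simp; omega

def tokenize_cmap_alt (data : String) : List String :=
  findTokens (stripComments data.toList)

-- ===== PRECONDITION & SPEC =====
def Spec_tokenize_cmap (data : String) (out : List String) : Prop := out = tokenize_cmap_alt data
instance (data : String) (out : List String) : Decidable (Spec_tokenize_cmap data out) := by unfold Spec_tokenize_cmap; infer_instance

-- ===== CLAIM (what is proved, stated in full; the proofs are below) =====
def Claim_equal_tokenize_cmap : Prop := ∀ (data : String), Dom_tokenize_cmap data → Spec_tokenize_cmap data (tokenize_cmap data)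

-- ===== LEMMAS AND PROOFS =====

-- findTokens with a pending (all-ordinary, possibly empty) run already started.
def pendTokens (current : List Char) (l : List Char) : List String :=
  if current = [] then findTokens l
  else String.ofList (current ++ l.takeWhile ordinary) :: findTokens (l.dropWhile ordinary)

theorem tokACore_true (tokens : List String) (current : List Char) (l : List Char) :
    tokACore tokens current true l = tokACore tokens current false (dropComment l) := by
  induction l with
  | nil => simp [tokACore, dropComment]
  | cons c rest ih =>
    by_cases h : c = '\n'
    · subst h; simp [tokACore, dropComment]
    · simp [tokACore, dropComment, h, ih]

theorem ordinary_spec (c : Char) (hc : ordinary c = true) :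
    pySpace c = false ∧ c ≠ '<' ∧ c ≠ '>' := by
  simp only [ordinary, Bool.and_eq_true, Bool.not_eq_true', decide_eq_true_eq] at hc
  tauto

theorem pendTokens_ordinary (current : List Char) (c : Char) (l : List Char)
    (hc : ordinary c = true) :
    pendTokens (current ++ [c]) l = pendTokens current (c :: l) := by
  obtain ⟨h1, h2, h3⟩ := ordinary_spec c hc
  rcases current with _ | ⟨d, ds⟩ <;>
    simp [pendTokens, findTokens, List.takeWhile, List.dropWhile, hc, h1, h2, h3]

theorem pendTokens_stop (current : List Char) (c : Char) (l : List Char)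
    (hc : ordinary c = false) (hne : current ≠ []) :
    pendTokens current (c :: l) = String.ofList current :: findTokens (c :: l) := by
  simp [pendTokens, hne, List.takeWhile, List.dropWhile, hc]

theorem tokACore_eq_pend_aux (n : Nat) : ∀ (l : List Char), l.length ≤ n →
    ∀ (tokens : List String) (current : List Char),
    tokACore tokens current false l = tokens ++ pendTokens current (stripComments l) := by
  induction n with
  | zero =>
    intro l hl tokens current
    rw [List.length_eq_zero_iff.mp (Nat.le_zero.mp hl)]
    rcases current with _ | ⟨d, ds⟩ <;> simp [tokACore, stripComments, pendTokens, findTokens]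
  | succ n ih =>
    intro l hl
    rcases l with _ | ⟨c, rest⟩
    · intro tokens current
      rcases current with _ | ⟨d, ds⟩ <;> simp [tokACore, stripComments, pendTokens, findTokens]
    · have hrest : rest.length ≤ n := by simp at hl; omega
      intro tokens current
      by_cases hp : c = '%'
      · subst hp
        have h1 : tokACore tokens current false ('%' :: rest)
            = tokACore tokens current true rest := by
          simp [tokACore]
        rw [h1, tokACore_true, ih _ (le_trans (dropComment_length_le rest) hrest),
          show stripComments ('%' :: rest) = stripComments (dropComment rest) by
            simp [stripComments]]
      · by_cases hs : pySpace c = true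
        · rcases Decidable.em (current = []) with hcur | hcur
          · subst hcur
            simp [tokACore, hp, hs, stripComments, pendTokens, findTokens, ih _ hrest]
          · simp only [tokACore, hp, hs, if_false, reduceIte, if_neg hcur, ih _ hrest]
            rw [show stripComments (c :: rest) = c :: stripComments rest by
                simp [stripComments, hp],
              pendTokens_stop current c _ (by simp [ordinary, hs]) hcur]
            simp [pendTokens, findTokens, hs]
        · by_cases hb : c = '<' ∨ c = '>'
          · have hordf : ordinary c = false := by
              rcases hb with h | h <;> simp [ordinary, h]
            rcases Decidable.em (current = []) with hcur | hcur
            · subst hcur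
              simp [tokACore, hp, hs, hb, stripComments, pendTokens, findTokens, ih _ hrest]
            · simp only [tokACore, hp, hs, if_false, reduceIte, hb, if_neg hcur, ih _ hrest]
              rw [show stripComments (c :: rest) = c :: stripComments rest by
                  simp [stripComments, hp],
                pendTokens_stop current c _ hordf hcur]
              simp [pendTokens, findTokens, hs, hb]
          · have hord : ordinary c = true := by
              simp [ordinary, hs]; tauto
            simp only [tokACore, hp, hs, if_false, hb, ih _ hrest]
            rw [show stripComments (c :: rest) = c :: stripComments rest by
                simp [stripComments, hp],
              pendTokens_ordinary current c _ hord]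
            simp

-- ===== VERDICT (by name: the statement is the Claim_ definition above) =====
theorem tokenize_cmap_spec : Claim_equal_tokenize_cmap := by
  intro data _
  show tokenize_cmap data = tokenize_cmap_alt data
  rw [tokenize_cmap, tokenize_cmap_alt,
    tokACore_eq_pend_aux data.toList.length data.toList le_rfl]
  simp [pendTokens]
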